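-- pv_equiv track=rewrite | github.com/Rubo12345/N-Queens-Problem-using-planning-algorithms | Machine-Learning-Approach/main.py | queen_positions
-- ===== SOURCE A (Python) =====
-- def queen_positions(grid):
--     queen_pos = []
--     for i in range(0, len(grid)):
--         for j in range(0, len(grid)):
--             if grid[j][i] != 0:
--                 queen_pos.append(j)
--                 continue
--     return queen_pos
-- ===== SOURCE B (Python) =====
-- def queen_positions(grid):
--     n = len(grid)
--     hits = [(i, j) for j, row in enumerate(grid) for i in range(n) if row[i] != 0]
--     hits.sort()
--     return [j for _, j in hits]
-- ===== Notes on version B (the rewrite author's own statement) =====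
-- stated objective: alternative
-- what changed: Instead of A's column-major double indexed scan appending row indices directly, B makes one row-major pass over enumerate(grid) collecting (column, row) coordinate pairs of nonzero cells, sorts the pairs lexicographically, and projects out the row components.
import Mathlib
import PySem

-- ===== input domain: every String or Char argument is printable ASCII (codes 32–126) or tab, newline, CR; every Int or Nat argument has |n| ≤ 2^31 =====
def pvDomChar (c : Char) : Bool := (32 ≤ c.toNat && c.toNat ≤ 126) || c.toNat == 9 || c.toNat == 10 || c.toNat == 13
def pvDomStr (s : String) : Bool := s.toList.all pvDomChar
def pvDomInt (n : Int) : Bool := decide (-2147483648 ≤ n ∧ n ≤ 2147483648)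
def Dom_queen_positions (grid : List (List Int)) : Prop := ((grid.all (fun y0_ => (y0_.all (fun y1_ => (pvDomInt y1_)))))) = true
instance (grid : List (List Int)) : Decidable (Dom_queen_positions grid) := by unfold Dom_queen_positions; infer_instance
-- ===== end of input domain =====

-- B replaces A's column-major indexed double scan with: one row-major pass collecting (col,row) pairs of nonzero cells, a lexicographic sort, and a projection to the rows; Pre_ excludes ragged grids on which the Python raises IndexError.


-- ===== PORT A =====
def queen_positions (grid : List (List Int)) : List Int :=
  (PySem.List.pyRange 0 (grid.length : Int) 1).foldl (fun queen_pos i =>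
    (PySem.List.pyRange 0 (grid.length : Int) 1).foldl (fun queen_pos j =>
      if PySem.List.pyGetD (PySem.List.pyGetD grid j []) i 0 ≠ 0
      then queen_pos ++ [j] else queen_pos) queen_pos) []

-- ===== PORT B =====
def queen_positions_alt (grid : List (List Int)) : List Int :=
  let n := grid.length
  let hits := (PySem.List.enumerate grid).flatMap (fun jr =>
    ((PySem.List.pyRange 0 (n : Int) 1).filter
        (fun i => decide (PySem.List.pyGetD jr.2 i 0 ≠ 0))).map (fun i => (i, jr.1)))
  (PySem.List.sorted2 hits Prod.fst Prod.snd).map Prod.snd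

-- ===== PRECONDITION & SPEC =====
-- Pre_ excludes exactly the ragged grids (some row shorter than the number of rows), on which the
-- Python A (and B) raises IndexError at grid[j][i] / row[i].
def Pre_queen_positions (grid : List (List Int)) : Prop :=
  ∀ row ∈ grid, grid.length ≤ row.length
instance (grid : List (List Int)) : Decidable (Pre_queen_positions grid) := by
  unfold Pre_queen_positions; infer_instance
def pvWitness_queen_positions : List (List Int) := [[0, 1], [1, 0]]
def Spec_queen_positions (grid : List (List Int)) (out : List Int) : Prop := out = queen_positions_alt grid
instance (grid : List (List Int)) (out : List Int) : Decidable (Spec_queen_positions grid out) := by unfold Spec_queen_positions; infer_instance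

-- ===== CLAIM (what is proved, stated in full; the proofs are below) =====
def Claim_equal_queen_positions : Prop := ∀ (grid : List (List Int)), Dom_queen_positions grid → Pre_queen_positions grid → Spec_queen_positions grid (queen_positions grid)

-- ===== LEMMAS AND PROOFS =====

-- strict lex order on coordinate pairs, its reflexive closure, and sorted2's boolean comparison
def pvLexLt (a b : Int × Int) : Prop := a.1 < b.1 ∨ (a.1 = b.1 ∧ a.2 < b.2)
def pvLexLe (a b : Int × Int) : Prop := a.1 < b.1 ∨ (a.1 = b.1 ∧ a.2 ≤ b.2)
def pvLexB (a b : Int × Int) : Bool :=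
  decide (a.1 < b.1) || (!decide (b.1 < a.1) && decide (a.2 < b.2))

theorem enumerate_eq_range_map {α : Type} (xs : List α) (d : α) : ∀ (s : Int),
    PySem.List.enumerate xs s
      = (List.range xs.length).map (fun k : ℕ => (s + (k : Int), xs.getD k d)) := by
  induction xs with
  | nil => intro s; simp [PySem.List.enumerate_nil]
  | cons x xs ih =>
      intro s
      rw [PySem.List.enumerate_cons, ih (s + 1)]
      simp only [List.length_cons, List.range_succ_eq_map, List.map_cons, List.map_map]
      refine List.cons_eq_cons.mpr ⟨by simp, ?_⟩
      apply List.map_congr_left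
      intro k _
      simp only [Function.comp_apply, List.getD_cons_succ, Prod.mk.injEq]
      exact ⟨by push_cast; ring, trivial⟩

theorem filter_map_eq_flatMap_ite {β : Type} (l : List ℕ) (q : ℕ → Bool) (g : ℕ → β) :
    (l.filter q).map g = l.flatMap (fun i => if q i then [g i] else []) := by
  induction l with
  | nil => simp
  | cons x xs ih =>
      by_cases h : q x = true
      · simp [h, ih]
      · simp only [Bool.not_eq_true] at h
        simp [h, ih]

theorem swap_flatMap_perm {β : Type} (n : ℕ) (q : ℕ → ℕ → Bool) (g : ℕ → ℕ → β) :
    ((List.range n).flatMap (fun j => (List.range n).flatMap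
        (fun i => if q i j then [g i j] else []))).Perm
      ((List.range n).flatMap (fun i => (List.range n).flatMap
        (fun j => if q i j then [g i j] else []))) := by
  rw [← Multiset.coe_eq_coe]
  show ((List.range n).flatMap (fun j => (List.range n).flatMap
        (fun i => if q i j then [g i j] else [])) : Multiset β) = _
  rw [← Multiset.coe_bind, ← Multiset.coe_bind]
  simp only [← Multiset.coe_bind]
  exact Multiset.bind_bind _ _

theorem insertBy_lex_pairwise (x : Int × Int) (acc : List (Int × Int))
    (h : acc.Pairwise pvLexLe) : (PySem.List.insertBy pvLexB x acc).Pairwise pvLexLe := by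
  induction acc with
  | nil => simp [PySem.List.insertBy]
  | cons y ys ih =>
      rw [List.pairwise_cons] at h
      by_cases hb : pvLexB x y = true
      · rw [show PySem.List.insertBy pvLexB x (y :: ys) = x :: y :: ys by
            simp [PySem.List.insertBy, hb]]
        simp only [pvLexB, Bool.or_eq_true, Bool.and_eq_true, Bool.not_eq_true',
          decide_eq_true_eq, decide_eq_false_iff_not] at hb
        refine List.pairwise_cons.mpr ⟨?_, List.pairwise_cons.mpr h⟩
        intro z hz
        rcases List.mem_cons.mp hz with rfl | hz
        · unfold pvLexLe; omega
        · have hyz := h.1 z hz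
          unfold pvLexLe at hyz ⊢; omega
      · simp only [Bool.not_eq_true] at hb
        rw [show PySem.List.insertBy pvLexB x (y :: ys) = y :: PySem.List.insertBy pvLexB x ys by
            simp [PySem.List.insertBy, hb]]
        refine List.pairwise_cons.mpr ⟨?_, ih h.2⟩
        intro z hz
        rcases (PySem.List.mem_insertBy pvLexB x z ys).mp hz with hz | hz
        · subst hz
          simp only [pvLexB, Bool.or_eq_false_iff, Bool.and_eq_false_iff, Bool.not_eq_false',
            decide_eq_true_eq, decide_eq_false_iff_not] at hb
          unfold pvLexLe; omega
        · exact h.1 z hz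

theorem foldl_insertBy_pairwise (xs : List (Int × Int)) : ∀ (acc : List (Int × Int)),
    acc.Pairwise pvLexLe →
    (xs.foldl (fun acc x => PySem.List.insertBy pvLexB x acc) acc).Pairwise pvLexLe := by
  induction xs with
  | nil => intro acc h; simpa using h
  | cons x xs ih =>
      intro acc h
      exact ih _ (insertBy_lex_pairwise x acc h)

theorem sorted2_eq_foldl (xs : List (Int × Int)) :
    PySem.List.sorted2 xs Prod.fst Prod.snd
      = xs.foldl (fun acc x => PySem.List.insertBy pvLexB x acc) [] := rfl

-- uniqueness of the strictly lex-sorted rearrangement: sorted2 with keys (fst, snd) returns it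
theorem sorted2_lex_eq (xs ys : List (Int × Int)) (hperm : ys.Perm xs)
    (hsort : ys.Pairwise pvLexLt) :
    PySem.List.sorted2 xs Prod.fst Prod.snd = ys := by
  apply List.Perm.eq_of_pairwise (le := pvLexLe)
  · intro a b _ _ hab hba
    obtain ⟨a1, a2⟩ := a; obtain ⟨b1, b2⟩ := b
    unfold pvLexLe at hab hba
    simp only at hab hba
    have h : a1 = b1 ∧ a2 = b2 := by omega
    simp [h.1, h.2]
  · rw [sorted2_eq_foldl]
    exact foldl_insertBy_pairwise xs [] (by simp)
  · exact hsort.imp (fun h => by unfold pvLexLt pvLexLe at *; omega)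
  · exact (PySem.List.sorted2_perm xs Prod.fst Prod.snd false).trans hperm.symm

-- ===== VERDICT (by name: the statement is the Claim_ definition above) =====
theorem queen_positions_spec : Claim_equal_queen_positions := by
  intro grid _ _
  unfold Spec_queen_positions queen_positions queen_positions_alt
  dsimp only
  set n := grid.length with hn
  set q : ℕ → ℕ → Bool := fun i j =>
    decide (PySem.List.pyGetD (PySem.List.pyGetD grid (j : Int) []) (i : Int) 0 ≠ 0) with hq
  -- the column-major coordinate list (strictly lex-sorted) and the row-major one
  set CM : List (Int × Int) := (List.range n).flatMap (fun i =>
    ((List.range n).filter (fun j => q i j)).map (fun j : ℕ => ((i : Int), (j : Int)))) with hCM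
  set RM : List (Int × Int) := (List.range n).flatMap (fun j =>
    ((List.range n).filter (fun i => q i j)).map (fun i : ℕ => ((i : Int), (j : Int)))) with hRM
  -- A's result: for each column i (ascending), the rows j (ascending) with a nonzero entry
  have hA : (PySem.List.pyRange 0 (n : Int) 1).foldl (fun queen_pos i =>
      (PySem.List.pyRange 0 (n : Int) 1).foldl (fun queen_pos j =>
        if PySem.List.pyGetD (PySem.List.pyGetD grid j []) i 0 ≠ 0
        then queen_pos ++ [j] else queen_pos) queen_pos) []
      = (List.range n).flatMap (fun i : ℕ =>
          ((List.range n).filter (fun j => q i j)).map (fun j : ℕ => (j : Int))) := by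
    rw [PySem.List.pyRange_zero_nat, List.foldl_map]
    have hinner : ∀ (acc : List Int) (i : ℕ),
        ((List.range n).map (fun k : ℕ => (k : Int))).foldl (fun queen_pos j =>
            if PySem.List.pyGetD (PySem.List.pyGetD grid j []) ((i : ℕ) : Int) 0 ≠ 0
            then queen_pos ++ [j] else queen_pos) acc
          = acc ++ ((List.range n).filter (fun j => q i j)).map (fun j : ℕ => (j : Int)) := by
      intro acc i
      rw [List.foldl_map]
      exact PySem.List.foldl_append_ite
        (p := fun j : ℕ => PySem.List.pyGetD (PySem.List.pyGetD grid (j : Int) []) (i : Int) 0 ≠ 0)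
        (f := fun j : ℕ => (j : Int)) _ _
    rw [PySem.List.foldl_congr_mem (List.range n) _
        (fun acc (i : ℕ) => acc ++ ((List.range n).filter (fun j => q i j)).map
          (fun j : ℕ => (j : Int))) []
        (fun acc i _ => hinner acc i)]
    rw [PySem.List.foldl_append_eq_flatMap]
    simp
  rw [hA]
  -- B's hit list is exactly the row-major coordinate list
  have hhits : (PySem.List.enumerate grid).flatMap (fun jr =>
      ((PySem.List.pyRange 0 (n : Int) 1).filter
          (fun i => decide (PySem.List.pyGetD jr.2 i 0 ≠ 0))).map (fun i => (i, jr.1)))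
      = RM := by
    rw [show PySem.List.enumerate grid = PySem.List.enumerate grid 0 from rfl]
    rw [enumerate_eq_range_map grid [] 0, List.flatMap_map, hRM]
    apply congrArg (fun g => List.flatMap g (List.range n))
    funext j
    simp only [zero_add, PySem.List.pyRange_zero_nat, List.filter_map, List.map_map]
    congr 1
    apply List.filter_congr
    intro i _
    simp [hq, PySem.List.pyGetD_natCast]
  rw [hhits]
  -- the row-major hit list is a rearrangement of the column-major one
  have hperm : CM.Perm RM := by
    rw [hCM, hRM]
    have h1 : ∀ (i : ℕ), ((List.range n).filter (fun j => q i j)).map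
        (fun j : ℕ => (((i : ℕ) : Int), ((j : ℕ) : Int)))
        = (List.range n).flatMap (fun j => if q i j then [((i : Int), (j : Int))] else []) :=
      fun i => filter_map_eq_flatMap_ite _ _ _
    have h2 : ∀ (j : ℕ), ((List.range n).filter (fun i => q i j)).map
        (fun i : ℕ => ((i : Int), (j : Int)))
        = (List.range n).flatMap (fun i => if q i j then [((i : Int), (j : Int))] else []) :=
      fun j => filter_map_eq_flatMap_ite _ _ _
    simp only [h1, h2]
    exact (swap_flatMap_perm n q (fun i j => ((i : Int), (j : Int)))).symm
  -- the column-major coordinate list is strictly lex-increasing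
  have hsortCM : CM.Pairwise pvLexLt := by
    rw [hCM, List.pairwise_flatMap]
    constructor
    · intro i _
      rw [List.pairwise_map]
      have hp : ((List.range n).filter (fun j => q i j)).Pairwise (· < ·) :=
        List.Pairwise.filter _ List.pairwise_lt_range
      exact hp.imp (fun hlt => by simp only [pvLexLt]; simp; omega)
    · apply List.pairwise_lt_range.imp
      intro i1 i2 hlt x hx y hy
      obtain ⟨j1, _, rfl⟩ := List.mem_map.mp hx
      obtain ⟨j2, _, rfl⟩ := List.mem_map.mp hy
      simp only [pvLexLt]
      simp
      omega
  rw [sorted2_lex_eq RM CM hperm hsortCM, hCM]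
  rw [List.map_flatMap]
  simp only [List.map_map]
  rfl
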